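-- pv_equiv track=rewrite | github.com/ClementChambard/nscpp | pp_toks.py | parse_preproc_number
-- ===== SOURCE A (Python) =====
-- def is_ident_continue(c: str) -> bool:
--     return c.isalnum() or c == '_'  # or unicode that has XID_continue
--
-- def parse_preproc_number(text: str) -> (str, str):
--     num = ""
--     if text[0] == '.':
--         num += '.'
--         text = text[1:]
--     num += text[0]
--     text = text[1:]
--     while len(text) > 0:
--         if len(text) > 1 and text[0] in 'PpEe' and text[1] in '+-':
--             num += text[0:2]
--             text = text[2:]
--             continue
--         if is_ident_continue(text[0]) or text[0] == '.':
--             num += text[0]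
--             text = text[1:]
--             continue
--         if len(text) > 1 and text[0] == '\'' and \
--            (text[1].isalnum() or text[1] == '_'):
--             num += text[0:2]
--             text = text[2:]
--             continue
--         break
--     return (text, num)
-- ===== SOURCE B (Python) =====
-- # Index-based scanner: compute the token's end index with one cursor, slice the input once.
-- def parse_preproc_number(text: str) -> (str, str):
--     n = len(text)
--     i = 2 if text[0] == '.' else 1
--     while i < n:
--         c = text[i]
--         if c in 'PpEe' and i + 1 < n and text[i + 1] in '+-':
--             i += 2
--         elif c.isalnum() or c == '_' or c == '.':
--             i += 1
--         elif c == "'" and i + 1 < n and (text[i + 1].isalnum() or text[i + 1] == '_'):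
--             i += 2
--         else:
--             break
--     return (text[i:], text[:i])
-- ===== Notes on version B (the rewrite author's own statement) =====
-- stated objective: faster
-- what changed: Replaces A's accumulate-and-reslice scanner (num += ..., text = text[1:] on every step) by a single integer cursor that only computes the token's end index, slicing the input once at the end.
-- outside the precondition, e.g. on parse_preproc_number('.'): A raises IndexError, B returns ('', '.')
import Mathlib
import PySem

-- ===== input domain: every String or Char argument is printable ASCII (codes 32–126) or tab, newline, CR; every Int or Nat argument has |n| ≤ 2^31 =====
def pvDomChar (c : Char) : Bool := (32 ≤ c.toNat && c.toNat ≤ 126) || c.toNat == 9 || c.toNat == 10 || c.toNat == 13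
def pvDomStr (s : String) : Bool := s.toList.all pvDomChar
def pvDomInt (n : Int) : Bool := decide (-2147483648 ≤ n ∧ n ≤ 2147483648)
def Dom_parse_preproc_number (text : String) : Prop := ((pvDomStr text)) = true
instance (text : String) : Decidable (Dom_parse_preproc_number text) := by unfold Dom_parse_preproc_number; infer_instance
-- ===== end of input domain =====

-- B replaces A's accumulate-and-reslice loop by a single end-index cursor and one final slice (alternative decomposition).
-- ===== PORT A =====
-- is_ident_continue: c.isalnum() or c == '_' (exact on the ASCII domain)
def pvIdentCont (c : Char) : Bool := c.isAlphanum || c = '_'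

-- the while loop of A: state = (remaining text, num so far); branches in source order
def pvALoop : List Char → List Char → List Char × List Char
  | [], num => ([], num)
  | [c], num =>
      if pvIdentCont c || c = '.' then pvALoop [] (num ++ [c])
      else ([c], num)
  | c :: d :: rest, num =>
      if (c = 'P' || c = 'p' || c = 'E' || c = 'e') && (d = '+' || d = '-') then
        pvALoop rest (num ++ [c, d])
      else if pvIdentCont c || c = '.' then
        pvALoop (d :: rest) (num ++ [c])
      else if c = '\'' && pvIdentCont d then
        pvALoop rest (num ++ [c, d])
      else (c :: d :: rest, num)
termination_by t _ => t.length

def parse_preproc_number (text : String) : String × String :=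
  let l := text.toList
  -- if text[0] == '.': num = '.', text = text[1:]  (text[0] on [] raises: outside Pre_)
  let p : List Char × List Char := if l.head? = some '.' then (l.drop 1, ['.']) else (l, [])
  match p.1 with
  | [] => ("", "")  -- Python raises IndexError here (num += text[0]); outside Pre_
  | c :: rest =>
      let r := pvALoop rest (p.2 ++ [c])
      (String.ofList r.1, String.ofList r.2)

-- ===== PORT B =====
-- the while loop of B: cursor i into the original character list, n = length
def pvBLoop (l : List Char) (n i : Nat) : Nat :=
  if _h : i < n then
    let c := l.getD i ' '
    if (c = 'P' || c = 'p' || c = 'E' || c = 'e') && i + 1 < n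
        && (l.getD (i+1) ' ' = '+' || l.getD (i+1) ' ' = '-') then
      pvBLoop l n (i + 2)
    else if c.isAlphanum || c = '_' || c = '.' then
      pvBLoop l n (i + 1)
    else if c = '\'' && i + 1 < n && ((l.getD (i+1) ' ').isAlphanum || l.getD (i+1) ' ' = '_') then
      pvBLoop l n (i + 2)
    else i
  else i
termination_by n - i

def parse_preproc_number_alt (text : String) : String × String :=
  let l := text.toList
  let n := l.length
  let i0 : Nat := if l.head? = some '.' then 2 else 1
  let i := pvBLoop l n i0
  (String.ofList (l.drop i), String.ofList (l.take i))

-- ===== PRECONDITION & SPEC =====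
-- Pre_ excludes exactly the inputs where A raises IndexError: the empty string and the lone ".".
def Pre_parse_preproc_number (text : String) : Prop := text ≠ "" ∧ text ≠ "."
instance (text : String) : Decidable (Pre_parse_preproc_number text) := by unfold Pre_parse_preproc_number; infer_instance
def pvWitness_parse_preproc_number : String := "0x1.8p+3f"

def Spec_parse_preproc_number (text : String) (out : String × String) : Prop := out = parse_preproc_number_alt text
instance (text : String) (out : String × String) : Decidable (Spec_parse_preproc_number text out) := by unfold Spec_parse_preproc_number; infer_instance

-- ===== CLAIM (what is proved, stated in full; the proofs are below) =====
def Claim_equal_parse_preproc_number : Prop := ∀ (text : String), Dom_parse_preproc_number text → Pre_parse_preproc_number text → Spec_parse_preproc_number text (parse_preproc_number text)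

-- ===== LEMMAS AND PROOFS =====

-- the number of characters either loop consumes from a remaining suffix
def pvCnt : List Char → Nat
  | [] => 0
  | [c] => if pvIdentCont c || c = '.' then 1 else 0
  | c :: d :: rest =>
      if (c = 'P' || c = 'p' || c = 'E' || c = 'e') && (d = '+' || d = '-') then
        2 + pvCnt rest
      else if pvIdentCont c || c = '.' then
        1 + pvCnt (d :: rest)
      else if c = '\'' && pvIdentCont d then
        2 + pvCnt rest
      else 0
termination_by l => l.length

lemma pvALoop_eq (t num : List Char) :
    pvALoop t num = (t.drop (pvCnt t), num ++ t.take (pvCnt t)) := by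
  fun_induction pvALoop t num <;>
    simp_all [pvCnt, pvALoop, Nat.add_comm] <;>
    split_ifs <;> simp_all

lemma pvGetD_eq (l : List Char) (i : Nat) (h : i < l.length) : l.getD i ' ' = l[i] := by
  simp [List.getD_eq_getElem?_getD, List.getElem?_eq_getElem h]

lemma pvBLoop_eq (l : List Char) (i : Nat) :
    pvBLoop l l.length i = i + pvCnt (List.drop i l) := by
  fun_induction pvBLoop l l.length i with
  | case1 i h c hc ih =>
      simp only [c, pvGetD_eq l i h, Bool.and_eq_true, Bool.or_eq_true, decide_eq_true_eq] at hc
      have h1 : i + 1 < l.length := hc.1.2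
      simp only [pvGetD_eq l (i+1) h1] at hc
      rw [ih, List.drop_eq_getElem_cons h, List.drop_eq_getElem_cons h1]
      simp only [pvCnt]
      rw [if_pos (by simp only [Bool.and_eq_true, Bool.or_eq_true, decide_eq_true_eq]; exact ⟨hc.1.1, hc.2⟩)]
      simp only [show i + 1 + 1 = i + 2 from rfl]
      omega
  | case2 i h c hc hi ih =>
      simp only [c, pvGetD_eq l i h, Bool.and_eq_true, Bool.or_eq_true, decide_eq_true_eq] at hc hi
      rw [ih, List.drop_eq_getElem_cons h]
      by_cases h1 : i + 1 < l.length
      · rw [List.drop_eq_getElem_cons h1]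
        simp only [pvGetD_eq l (i+1) h1] at hc
        simp only [pvCnt]
        rw [if_neg (by
              simp only [Bool.and_eq_true, Bool.or_eq_true, decide_eq_true_eq]
              tauto),
          if_pos (by
              simp only [pvIdentCont, Bool.or_eq_true, decide_eq_true_eq]
              tauto)]
        rw [← List.drop_eq_getElem_cons h1]
        omega
      · rw [List.drop_eq_nil_of_le (by omega : l.length ≤ i + 1)]
        simp only [pvCnt]
        rw [if_pos (by
              simp only [pvIdentCont, Bool.or_eq_true, decide_eq_true_eq]
              tauto)]
  | case3 i h c hc hi hq ih =>
      simp only [c, pvGetD_eq l i h, Bool.and_eq_true, Bool.or_eq_true, decide_eq_true_eq] at hc hi hq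
      have h1 : i + 1 < l.length := hq.1.2
      simp only [pvGetD_eq l (i+1) h1] at hq
      rw [ih, List.drop_eq_getElem_cons h, List.drop_eq_getElem_cons h1]
      have hcq : l[i] = '\'' := hq.1.1
      simp only [pvCnt]
      rw [if_neg (by simp [hcq]),
        if_neg (by
            simp only [pvIdentCont, Bool.or_eq_true, decide_eq_true_eq]
            tauto),
        if_pos (by simp only [pvIdentCont, hcq, Bool.and_eq_true, Bool.or_eq_true, decide_eq_true_eq]; tauto)]
      simp only [show i + 1 + 1 = i + 2 from rfl]
      omega
  | case4 i h c hc hi hq =>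
      simp only [c, pvGetD_eq l i h, Bool.and_eq_true, Bool.or_eq_true,
        decide_eq_true_eq] at hc hi hq
      rw [List.drop_eq_getElem_cons h]
      by_cases h1 : i + 1 < l.length
      · rw [List.drop_eq_getElem_cons h1]
        simp only [pvGetD_eq l (i+1) h1] at hc hq
        simp only [pvCnt]
        rw [if_neg (by
              simp only [Bool.and_eq_true, Bool.or_eq_true, decide_eq_true_eq]
              tauto),
          if_neg (by
              simp only [pvIdentCont, Bool.or_eq_true, decide_eq_true_eq]
              tauto),
          if_neg (by
              simp only [pvIdentCont, Bool.and_eq_true, Bool.or_eq_true, decide_eq_true_eq]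
              tauto)]
        omega
      · rw [List.drop_eq_nil_of_le (by omega : l.length ≤ i + 1)]
        simp only [pvCnt]
        rw [if_neg (by
              simp only [pvIdentCont, Bool.or_eq_true, decide_eq_true_eq]
              tauto)]
        omega
  | case5 i h =>
      simp [List.drop_eq_nil_of_le (Nat.le_of_not_lt h), pvCnt]

-- ===== VERDICT =====
theorem parse_preproc_number_spec : Claim_equal_parse_preproc_number := by
  intro text _ hpre
  unfold Spec_parse_preproc_number parse_preproc_number parse_preproc_number_alt
  rcases hl : text.toList with _ | ⟨ch, rest0⟩
  · exact absurd (String.toList_inj.mp (by simp [hl])) hpre.1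
  · by_cases hdot : ch = '.'
    · subst hdot
      rcases rest0 with _ | ⟨c, rest⟩
      · exact absurd (String.toList_inj.mp (by simp [hl])) hpre.2
      · simp only [List.head?_cons, List.drop_succ_cons, List.drop_zero,
          pvALoop_eq, pvBLoop_eq]
        simp [show (2:Nat) + pvCnt rest = pvCnt rest + 1 + 1 from by omega, List.take_succ_cons,
          List.drop_succ_cons]
    · simp only [List.head?_cons, pvALoop_eq, pvBLoop_eq]
      rw [if_neg (by simp [hdot]), if_neg (by simp [hdot])]
      simp [show (1:Nat) + pvCnt rest0 = pvCnt rest0 + 1 from by omega, List.take_succ_cons,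
        List.drop_succ_cons]
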